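-- pv_equiv track=rewrite | github.com/ProtikBose/Programming-Practice | Dynamic Programming/Maximum Difference Between Two Elements ( Two conditions ).py | solution
-- ===== SOURCE A (Python) =====
-- def solution(lst) :
--
--     if len(lst) == 0 or len(lst) == 1 :
--             return 0
--
--     max_diff = lst[0] - lst[1]
--     curr_min = lst[0]
--
--     for i in range(1,len(lst)) :
--         if  curr_min - lst[i]  > max_diff :
--             max_diff = curr_min - lst[i]
--         if lst[i] > curr_min :
--             curr_min = lst[i]
--
--     if max_diff <= 0 :
--         return 0
--     return max_diff
-- ===== SOURCE B (Python) =====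
-- def solution(lst):
--     best = 0
--     for i in range(1, len(lst)):
--         d = max(lst[:i]) - lst[i]
--         if d > best:
--             best = d
--     return best
-- ===== Notes on version B (the rewrite author's own statement) =====
-- stated objective: alternative
-- what changed: Replaces the single-pass running max_diff/curr_min state machine (with a length guard and a final positivity clamp) by a stateless loop that recomputes max(lst[:i]) for each position i and maximises max(lst[:i])-lst[i] against an initial 0, which subsumes both guards.
import Mathlib
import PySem

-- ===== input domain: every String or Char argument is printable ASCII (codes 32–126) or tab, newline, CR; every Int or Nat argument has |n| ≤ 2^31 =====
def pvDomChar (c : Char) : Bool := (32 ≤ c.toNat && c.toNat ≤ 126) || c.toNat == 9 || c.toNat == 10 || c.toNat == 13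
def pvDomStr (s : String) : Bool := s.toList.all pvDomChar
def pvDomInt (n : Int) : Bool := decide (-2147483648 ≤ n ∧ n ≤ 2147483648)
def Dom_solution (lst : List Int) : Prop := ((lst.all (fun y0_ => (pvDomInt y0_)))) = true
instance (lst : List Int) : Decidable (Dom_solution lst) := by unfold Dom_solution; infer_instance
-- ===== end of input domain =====

-- B replaces A's single-pass running max_diff/curr_min state machine by a stateless loop
-- maximising max(lst[:i]) - lst[i] against 0, subsuming A's length guard and final clamp.

-- ===== PORT A =====
def solution (lst : List Int) : Int :=
  if lst.length = 0 ∨ lst.length = 1 then 0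
  else
    let st := (PySem.List.pyRange 1 lst.length 1).foldl
      (fun (s : Int × Int) i =>
        let md := if s.2 - PySem.List.pyGetD lst i 0 > s.1 then s.2 - PySem.List.pyGetD lst i 0 else s.1
        let cm := if PySem.List.pyGetD lst i 0 > s.2 then PySem.List.pyGetD lst i 0 else s.2
        (md, cm))
      (PySem.List.pyGetD lst 0 0 - PySem.List.pyGetD lst 1 0, PySem.List.pyGetD lst 0 0)
    if st.1 ≤ 0 then 0 else st.1

-- ===== PORT B =====
-- max(lst[:i]) : i ≥ 1 in the loop, so the slice is nonempty and the .getD default is never used (exact)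
def solution_alt (lst : List Int) : Int :=
  (PySem.List.pyRange 1 lst.length 1).foldl
    (fun best i =>
      let d := (PySem.List.max? (PySem.List.slice lst none (some i)) (fun y => y)).getD 0
               - PySem.List.pyGetD lst i 0
      if d > best then d else best)
    0

-- ===== PRECONDITION & SPEC =====
def Spec_solution (lst : List Int) (out : Int) : Prop := out = solution_alt lst
instance (lst : List Int) (out : Int) : Decidable (Spec_solution lst out) := by unfold Spec_solution; infer_instance

-- ===== CLAIM (what is proved, stated in full; the proofs are below) =====
def Claim_equal_solution : Prop := ∀ (lst : List Int), Dom_solution lst → Spec_solution lst (solution lst)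

-- ===== LEMMAS AND PROOFS =====

-- element access shorthand, prefix maximum, and A's running max-difference value
def pvG (lst : List Int) (i : Int) : Int := PySem.List.pyGetD lst i 0

def pvPM (lst : List Int) : Nat → Int
  | 0 => pvG lst 0
  | k+1 => max (pvPM lst k) (pvG lst ((k : Int)+1))

def pvD (lst : List Int) : Nat → Int
  | 0 => pvG lst 0 - pvG lst 1
  | k+1 => max (pvD lst k) (pvPM lst (k+1) - pvG lst ((k : Int)+2))

-- A's loop state after processing i = 1 .. k+1
theorem pvA_loop (lst : List Int) (k : Nat) :
    (PySem.List.pyRange 1 ((k : Int)+2) 1).foldl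
      (fun (s : Int × Int) i =>
        let md := if s.2 - PySem.List.pyGetD lst i 0 > s.1 then s.2 - PySem.List.pyGetD lst i 0 else s.1
        let cm := if PySem.List.pyGetD lst i 0 > s.2 then PySem.List.pyGetD lst i 0 else s.2
        (md, cm))
      (PySem.List.pyGetD lst 0 0 - PySem.List.pyGetD lst 1 0, PySem.List.pyGetD lst 0 0)
    = (pvD lst k, pvPM lst (k+1)) := by
  induction k with
  | zero =>
    rw [show ((0:Nat):Int)+2 = (1:Int)+1 by norm_num, PySem.List.pyRange_one_singleton]
    simp only [List.foldl_cons, List.foldl_nil, pvD, pvPM, pvG, Prod.mk.injEq,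
      Nat.cast_zero, zero_add]
    refine ⟨?_, ?_⟩ <;> split_ifs <;> omega
  | succ k ih =>
    rw [show ((k+1:Nat):Int)+2 = ((k:Int)+2)+1 by push_cast; ring,
        PySem.List.pyRange_one_succ_right (by omega : (1:Int) ≤ (k:Int)+2),
        List.foldl_append, ih]
    simp only [List.foldl_cons, List.foldl_nil]
    have h1 : pvD lst (k+1) = max (pvD lst k) (pvPM lst (k+1) - pvG lst ((k : Int)+2)) := rfl
    have h2 : pvPM lst (k+2) = max (pvPM lst (k+1)) (pvG lst ((k : Int)+1+1)) := rfl
    rw [h1, h2, show ((k:Int)+1+1) = (k:Int)+2 by ring]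
    unfold pvG
    simp only [Prod.mk.injEq]
    refine ⟨?_, ?_⟩ <;> split_ifs <;> omega

-- max over a nonempty prefix is the prefix maximum pvPM
theorem pvMaxTake (x : Int) (t : List Int) (k : Nat) (h : k ≤ t.length) :
    (t.take k).foldl max x = pvPM (x :: t) k := by
  induction k with
  | zero => simp [pvPM, pvG, PySem.List.pyGetD]
  | succ k ih =>
    rw [List.take_add_one, List.getElem?_eq_getElem (by omega : k < t.length)]
    simp only [Option.toList_some, List.foldl_append, List.foldl_cons, List.foldl_nil,
      ih (by omega)]
    have h2 : pvPM (x :: t) (k+1) = max (pvPM (x :: t) k) (pvG (x :: t) ((k : Int)+1)) := rfl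
    rw [h2]
    have h3 : pvG (x :: t) ((k : Int)+1) = t[k] := by
      unfold pvG
      rw [show ((k:Int)+1) = ((k+1:Nat):Int) by push_cast; ring,
          PySem.List.pyGetD_natCast]
      simp [List.getD, List.getElem?_eq_getElem (by simpa using Nat.succ_lt_succ (by omega : k < t.length))]
      rfl
    rw [h3]
    rfl


theorem pvMaxSlice (lst : List Int) (k : Nat) (h : k < lst.length) :
    (PySem.List.max? (PySem.List.slice lst none (some ((k : Int)+1))) (fun y => y)).getD 0
      = pvPM lst k := by
  match lst with
  | [] => simp at h
  | x :: t =>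
    rw [show ((k:Int)+1) = ((k+1:Nat):Int) by push_cast; ring,
        PySem.List.slice_to_natCast]
    simp only [List.take_succ_cons, PySem.List.max?_id_cons, Option.getD_some]
    exact pvMaxTake x t k (by simpa using Nat.lt_succ_iff.mp h)

-- B's loop over i = 1 .. k+1 is the clamped running maximum
theorem pvB_loop (lst : List Int) (k : Nat) (h : k + 2 ≤ lst.length) :
    (PySem.List.pyRange 1 ((k : Int)+2) 1).foldl
      (fun best i =>
        let d := (PySem.List.max? (PySem.List.slice lst none (some i)) (fun y => y)).getD 0
                 - PySem.List.pyGetD lst i 0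
        if d > best then d else best)
      0
    = max 0 (pvD lst k) := by
  induction k with
  | zero =>
    rw [show PySem.List.pyRange 1 (((0:Nat):Int)+2) 1 = [1] from by decide]
    simp only [List.foldl_cons, List.foldl_nil]
    rw [show (some (1:Int)) = some (((0:Nat):Int)+1) by norm_num,
        pvMaxSlice lst 0 (by omega)]
    simp only [pvD, pvPM, pvG]
    split_ifs <;> omega
  | succ k ih =>
    rw [show ((k+1:Nat):Int)+2 = ((k:Int)+2)+1 by push_cast; ring,
        PySem.List.pyRange_one_succ_right (by omega : (1:Int) ≤ (k:Int)+2),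
        List.foldl_append, ih (by omega)]
    simp only [List.foldl_cons, List.foldl_nil]
    rw [show (k:Int)+2 = ((k+1:Nat):Int)+1 by push_cast; ring,
        pvMaxSlice lst (k+1) (by omega)]
    have h1 : pvD lst (k+1) = max (pvD lst k) (pvPM lst (k+1) - pvG lst ((k : Int)+2)) := rfl
    rw [h1, show ((k+1:Nat):Int)+1 = (k:Int)+2 by push_cast; ring]
    unfold pvG
    split_ifs <;> omega

-- ===== VERDICT (by name: the statement is the Claim_ definition above) =====
theorem solution_spec : Claim_equal_solution := by
  intro lst _
  unfold Spec_solution solution solution_alt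
  match lst with
  | [] =>
    simp [show PySem.List.pyRange (1:Int) 0 1 = [] from by decide]
  | [a] =>
    simp [show PySem.List.pyRange (1:Int) 1 1 = [] from by decide]
  | a :: b :: rest =>
    have hlen : (((a :: b :: rest).length : Int)) = ((rest.length : Int))+2 := by
      simp; ring
    rw [if_neg (by simp), hlen, pvA_loop (a :: b :: rest) rest.length,
        pvB_loop (a :: b :: rest) rest.length (by simp)]
    show (if pvD (a :: b :: rest) rest.length ≤ 0 then 0 else pvD (a :: b :: rest) rest.length)
        = max 0 (pvD (a :: b :: rest) rest.length)
    split_ifs <;> omega
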